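-- pv_equiv track=rewrite | github.com/cobaltCorsair/neuro_stats | neuro_stats/read_table.py | count_rows_cols
-- ===== SOURCE A (Python) =====
-- def count_rows_cols(boundingBoxes, width_threshold=50, height_threshold=50):
--     # Initialize row and column counts
--     row_count = 1
--     col_count = 1
--
--     # Initialize current position
--     current_x = boundingBoxes[0][0]
--     current_y = boundingBoxes[0][1]
--
--     for bbox in boundingBoxes[1:]:
--         x, y, _, _ = bbox
--
--         # If x coordinate changes significantly, increment column count
--         if abs(x - current_x) > width_threshold:
--             col_count += 1
--             current_x = x
--
--         # If y coordinate changes significantly, increment row count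
--         if abs(y - current_y) > height_threshold:
--             row_count += 1
--             current_y = y
--
--     return row_count, col_count
-- ===== SOURCE B (Python) =====
-- def chain_length(values, threshold):
--     # Length of the greedy anchor chain: start at values[0]; repeatedly jump to the
--     # FIRST later value differing from the current anchor by more than threshold.
--     ref = values[0]
--     tail = values[1:]
--     count = 1
--     while True:
--         j = next((i for i, v in enumerate(tail) if abs(v - ref) > threshold), None)
--         if j is None:
--             return count
--         count += 1
--         ref = tail[j]
--         tail = tail[j + 1:]
--
--
-- def count_rows_cols(boundingBoxes, width_threshold=50, height_threshold=50):
--     row_count = chain_length([b[1] for b in boundingBoxes], height_threshold)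
--     col_count = chain_length([b[0] for b in boundingBoxes], width_threshold)
--     return row_count, col_count
-- ===== Notes on version B (the rewrite author's own statement) =====
-- stated objective: alternative
-- what changed: Replaces A's single stateful per-element loop over four pieces of state with a per-axis anchor-chain computation: extract each coordinate list, then repeatedly search for the first value jumping past the current anchor and restart the scan on the remaining suffix, counting anchors.
import Mathlib
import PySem

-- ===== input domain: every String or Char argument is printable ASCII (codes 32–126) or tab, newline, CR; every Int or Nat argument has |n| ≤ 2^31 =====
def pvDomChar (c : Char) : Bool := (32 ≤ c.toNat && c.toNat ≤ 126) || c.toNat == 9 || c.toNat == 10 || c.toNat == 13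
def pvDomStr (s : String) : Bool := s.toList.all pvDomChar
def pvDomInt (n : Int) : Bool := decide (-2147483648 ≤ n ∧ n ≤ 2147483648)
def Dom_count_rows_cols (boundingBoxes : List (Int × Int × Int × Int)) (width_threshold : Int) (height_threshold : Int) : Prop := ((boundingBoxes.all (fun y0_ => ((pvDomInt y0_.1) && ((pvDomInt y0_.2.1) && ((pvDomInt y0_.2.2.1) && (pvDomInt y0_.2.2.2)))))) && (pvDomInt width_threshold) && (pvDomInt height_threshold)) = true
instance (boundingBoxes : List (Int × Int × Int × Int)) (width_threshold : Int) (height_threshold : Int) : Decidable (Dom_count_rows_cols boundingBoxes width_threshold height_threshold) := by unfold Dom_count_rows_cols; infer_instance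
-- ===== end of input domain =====

-- B replaces A's single stateful four-state loop with a per-axis anchor-chain count:
-- repeatedly search the suffix for the first value jumping past the current anchor (alternative decomposition).


-- ===== PORT A =====
-- A's loop step: state (row_count, col_count, current_x, current_y), branches in A's order.
def crcStepA (wt ht : Int) (s : Int × Int × Int × Int) (bbox : Int × Int × Int × Int) : Int × Int × Int × Int :=
  let (row_count, col_count, current_x, current_y) := s
  let (x, y, _, _) := bbox
  let (col_count, current_x) :=
    if |x - current_x| > wt then (col_count + 1, x) else (col_count, current_x)
  let (row_count, current_y) :=
    if |y - current_y| > ht then (row_count + 1, y) else (row_count, current_y)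
  (row_count, col_count, current_x, current_y)

def count_rows_cols (boundingBoxes : List (Int × Int × Int × Int)) (width_threshold : Int) (height_threshold : Int) : Int × Int :=
  match boundingBoxes with
  | [] => (1, 1)  -- unreachable under Pre_ (Python A raises IndexError on [])
  | b :: rest =>
    let s := rest.foldl (crcStepA width_threshold height_threshold) (1, 1, b.1, b.2.1)
    (s.1, s.2.1)

-- ===== PORT B =====
-- B's inner search: first value in tail with |v - ref| > thr, together with the suffix after it
-- (ports `next((i for i,v in enumerate(tail) ...), None)` + `tail[j]`, `tail[j+1:]`).
def findJump (thr ref : Int) : List Int → Option (Int × List Int)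
  | [] => none
  | v :: rest => if |v - ref| > thr then some (v, rest) else findJump thr ref rest

theorem findJump_shrinks (thr ref : Int) : ∀ (tail : List Int) (v : Int) (rest : List Int),
    findJump thr ref tail = some (v, rest) → rest.length < tail.length := by
  intro tail
  induction tail with
  | nil => intro v rest h; simp [findJump] at h
  | cons w t ih =>
    intro v rest h
    simp only [findJump] at h
    split at h
    · cases h; simp
    · exact Nat.lt_trans (ih v rest h) (by simp)

-- B's while-loop: count anchors of the greedy chain.
def chainGo (thr : Int) (ref : Int) (tail : List Int) (count : Int) : Int :=
  match h : findJump thr ref tail with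
  | none => count
  | some (v, rest) => chainGo thr v rest (count + 1)
termination_by tail.length
decreasing_by exact findJump_shrinks thr ref tail v rest h

def chain_length (values : List Int) (threshold : Int) : Int :=
  match values with
  | [] => 1  -- unreachable under Pre_ (Python B raises IndexError on values[0])
  | ref :: tail => chainGo threshold ref tail 1

def count_rows_cols_alt (boundingBoxes : List (Int × Int × Int × Int)) (width_threshold : Int) (height_threshold : Int) : Int × Int :=
  let row_count := chain_length (boundingBoxes.map (fun b => b.2.1)) height_threshold
  let col_count := chain_length (boundingBoxes.map (fun b => b.1)) width_threshold
  (row_count, col_count)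

-- ===== PRECONDITION & SPEC =====
-- Both Pythons raise IndexError on an empty list (A at boundingBoxes[0], B at values[0]).
def Pre_count_rows_cols (boundingBoxes : List (Int × Int × Int × Int)) (width_threshold : Int) (height_threshold : Int) : Prop := boundingBoxes ≠ []
instance (boundingBoxes : List (Int × Int × Int × Int)) (width_threshold : Int) (height_threshold : Int) : Decidable (Pre_count_rows_cols boundingBoxes width_threshold height_threshold) := by unfold Pre_count_rows_cols; infer_instance
def pvWitness_count_rows_cols : (List (Int × Int × Int × Int)) × Int × Int := ([(0, 0, 10, 10), (100, 0, 10, 10), (0, 100, 10, 10)], 50, 50)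

def Spec_count_rows_cols (boundingBoxes : List (Int × Int × Int × Int)) (width_threshold : Int) (height_threshold : Int) (out : Int × Int) : Prop := out = count_rows_cols_alt boundingBoxes width_threshold height_threshold
instance (boundingBoxes : List (Int × Int × Int × Int)) (width_threshold : Int) (height_threshold : Int) (out : Int × Int) : Decidable (Spec_count_rows_cols boundingBoxes width_threshold height_threshold out) := by unfold Spec_count_rows_cols; infer_instance

-- ===== CLAIM (what is proved, stated in full; the proofs are below) =====
def Claim_equal_count_rows_cols : Prop := ∀ (boundingBoxes : List (Int × Int × Int × Int)) (width_threshold : Int) (height_threshold : Int), Dom_count_rows_cols boundingBoxes width_threshold height_threshold → Pre_count_rows_cols boundingBoxes width_threshold height_threshold → Spec_count_rows_cols boundingBoxes width_threshold height_threshold (count_rows_cols boundingBoxes width_threshold height_threshold)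

-- ===== LEMMAS AND PROOFS =====
-- Unfolding equations for B's while-loop recursion.
theorem chainGo_none {thr ref : Int} {tail : List Int}
    (h : findJump thr ref tail = none) (c : Int) : chainGo thr ref tail c = c := by
  rw [chainGo]; split <;> simp_all

theorem chainGo_some {thr ref v : Int} {tail rest : List Int}
    (h : findJump thr ref tail = some (v, rest)) (c : Int) :
    chainGo thr ref tail c = chainGo thr v rest (c + 1) := by
  rw [chainGo]; split <;> simp_all

theorem chainGo_skip {thr ref v : Int} (rest : List Int)
    (h : ¬ |v - ref| > thr) (c : Int) :
    chainGo thr ref (v :: rest) c = chainGo thr ref rest c := by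
  cases hr : findJump thr ref rest with
  | none =>
    rw [chainGo_none hr, chainGo_none (show findJump thr ref (v :: rest) = none by
      simp [findJump, h, hr])]
  | some p =>
    rw [chainGo_some hr, chainGo_some (show findJump thr ref (v :: rest) = some (p.1, p.2) by
      simp [findJump, h, hr])]

-- The per-axis fold extracted from A equals B's anchor-chain recursion.
theorem fold_eq_chainGo (thr : Int) : ∀ (tail : List Int) (c ref : Int),
    (tail.foldl (fun (s : Int × Int) w =>
        if |w - s.2| > thr then (s.1 + 1, w) else s) (c, ref)).1 =
      chainGo thr ref tail c := by
  intro tail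
  induction tail with
  | nil => intro c ref; simp [chainGo_none (show findJump thr ref [] = none from rfl)]
  | cons v rest ih =>
    intro c ref
    by_cases h : |v - ref| > thr
    · rw [chainGo_some (show findJump thr ref (v :: rest) = some (v, rest) by
        simp [findJump, h])]
      simpa [h] using ih (c + 1) v
    · rw [chainGo_skip rest h]
      simpa [h] using ih c ref

-- The combined fold of A is the product of the two independent per-axis folds.
theorem crc_fold_split (wt ht : Int) :
    ∀ (rest : List (Int × Int × Int × Int)) (rc cc cx cy : Int),
      rest.foldl (crcStepA wt ht) (rc, cc, cx, cy) =
       (((rest.map (fun b => b.2.1)).foldl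
            (fun (s : Int × Int) w => if |w - s.2| > ht then (s.1 + 1, w) else s) (rc, cy)).1 ,
        ((rest.map (fun b => b.1)).foldl
            (fun (s : Int × Int) w => if |w - s.2| > wt then (s.1 + 1, w) else s) (cc, cx)).1 ,
        ((rest.map (fun b => b.1)).foldl
            (fun (s : Int × Int) w => if |w - s.2| > wt then (s.1 + 1, w) else s) (cc, cx)).2 ,
        ((rest.map (fun b => b.2.1)).foldl
            (fun (s : Int × Int) w => if |w - s.2| > ht then (s.1 + 1, w) else s) (rc, cy)).2) := by
  intro rest
  induction rest with
  | nil => intro rc cc cx cy; rfl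
  | cons b rest ih =>
    intro rc cc cx cy
    simp only [List.foldl_cons, List.map_cons, crcStepA]
    by_cases hx : |b.1 - cx| > wt <;> by_cases hy : |b.2.1 - cy| > ht <;>
      simp [hx, hy, ih]

-- ===== VERDICT (by name: the statement is the Claim_ definition above) =====
theorem count_rows_cols_spec : Claim_equal_count_rows_cols := by
  intro bs wt ht _ hpre
  unfold Spec_count_rows_cols
  match bs with
  | [] => exact absurd rfl hpre
  | b :: rest =>
    simp only [count_rows_cols, count_rows_cols_alt, chain_length, List.map_cons,
      crc_fold_split, fold_eq_chainGo]
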